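-- pv_equiv track=rewrite | github.com/WebWakaHub/webwaka-system-admin-dashboard | docs/cross-layer-integration-report/scripts/verification/verify_all_issues.py | get_organelle_for_issue
-- ===== SOURCE A (Python) =====
-- def get_organelle_for_issue(issue_num):
--     """Determine which organelle an issue belongs to"""
--     # 18 standard organelles: each has 29 issues
--     # 4 AI organelles: each has 29 issues
--     # Total: 22 organelles × 29 = 638 issues (but we have up to 1015)
--
--     # Known ranges from execution plan
--     ranges = [
--         (1, 29, "ORG-IA-SUBJECT_REGISTRY"),
--         (30, 58, "ORG-TB-BOUNDARY_CONTEXT"),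
--         (59, 87, "ORG-DP-RECORD_STORE"),
--         (88, 116, "ORG-CP-POLICY_DEFINITION"),
--         (117, 145, "ORG-ST-TRUST_ASSERTION"),
--         (146, 174, "ORG-ES-SCHEDULER_EXECUTOR"),
--         (175, 203, "ORG-WO-WORKFLOW_ORCHESTRATOR"),
--         (204, 232, "ORG-CI-MESSAGE_GATEWAY"),
--         (233, 261, "ORG-FV-VALIDATION_ENGINE"),
--         (262, 290, "ORG-RA-RESOURCE_ALLOCATOR"),
--         (291, 319, "ORG-EM-EVENT_DISPATCHER"),
--         (320, 348, "ORG-OD-DISCOVERY_REGISTRY"),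
--         (349, 377, "ORG-CM-COMPOSITION_MODELER"),
--         (378, 406, "ORG-RG-GOVERNANCE_REGISTRY"),
--         (407, 435, "ORG-TS-TELEMETRY_COLLECTOR"),
--         (436, 464, "ORG-LG-AUDIT_LOGGER"),
--         (465, 493, "ORG-IN-INSTRUMENTATION_PROBE"),
--         (494, 522, "ORG-EI-EXTERNAL_ADAPTER"),
--         (523, 551, "UNKNOWN_523"),
--         (552, 580, "UNKNOWN_552"),
--         (581, 609, "UNKNOWN_581"),
--         (610, 638, "UNKNOWN_610"),
--         (639, 667, "UNKNOWN_639"),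
--         (668, 696, "UNKNOWN_668"),
--         (697, 725, "UNKNOWN_725"),
--         (726, 754, "UNKNOWN_726"),
--         (755, 783, "UNKNOWN_755"),
--         (784, 812, "UNKNOWN_784"),
--         (813, 841, "UNKNOWN_813"),
--         (842, 870, "UNKNOWN_842"),
--         (871, 899, "UNKNOWN_871"),
--         (900, 928, "ORGN-AI-COGNITIVE_PORT"),
--         (929, 957, "ORGN-AI-PROMPT_ASSEMBLER"),
--         (958, 986, "ORGN-AI-RESULT_VALIDATOR"),
--         (987, 1015, "ORGN-AI-AUDIT_EMITTER"),
--     ]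
--     for lo, hi, name in ranges:
--         if lo <= issue_num <= hi:
--             return name
--     return "UNKNOWN"
-- ===== SOURCE B (Python) =====
-- # Closed-form: contiguous 29-wide blocks starting at 1, so index arithmetic replaces the range scan.
-- _NAMES = [
--     "ORG-IA-SUBJECT_REGISTRY", "ORG-TB-BOUNDARY_CONTEXT", "ORG-DP-RECORD_STORE",
--     "ORG-CP-POLICY_DEFINITION", "ORG-ST-TRUST_ASSERTION", "ORG-ES-SCHEDULER_EXECUTOR",
--     "ORG-WO-WORKFLOW_ORCHESTRATOR", "ORG-CI-MESSAGE_GATEWAY", "ORG-FV-VALIDATION_ENGINE",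
--     "ORG-RA-RESOURCE_ALLOCATOR", "ORG-EM-EVENT_DISPATCHER", "ORG-OD-DISCOVERY_REGISTRY",
--     "ORG-CM-COMPOSITION_MODELER", "ORG-RG-GOVERNANCE_REGISTRY", "ORG-TS-TELEMETRY_COLLECTOR",
--     "ORG-LG-AUDIT_LOGGER", "ORG-IN-INSTRUMENTATION_PROBE", "ORG-EI-EXTERNAL_ADAPTER",
--     "UNKNOWN_523", "UNKNOWN_552", "UNKNOWN_581", "UNKNOWN_610", "UNKNOWN_639",
--     "UNKNOWN_668", "UNKNOWN_725", "UNKNOWN_726", "UNKNOWN_755", "UNKNOWN_784",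
--     "UNKNOWN_813", "UNKNOWN_842", "UNKNOWN_871",
--     "ORGN-AI-COGNITIVE_PORT", "ORGN-AI-PROMPT_ASSEMBLER",
--     "ORGN-AI-RESULT_VALIDATOR", "ORGN-AI-AUDIT_EMITTER",
-- ]
--
-- def get_organelle_for_issue(issue_num):
--     """Determine which organelle an issue belongs to"""
--     if 1 <= issue_num <= 1015:
--         return _NAMES[(issue_num - 1) // 29]
--     return "UNKNOWN"
-- ===== Notes on version B (the rewrite author's own statement) =====
-- stated objective: simpler
-- what changed: Replaces the sequential scan over the list of (lo, hi, name) range tuples with a closed-form block-index computation into a flat name table, exploiting that the ranges are contiguous equal-width blocks.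
import Mathlib
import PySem

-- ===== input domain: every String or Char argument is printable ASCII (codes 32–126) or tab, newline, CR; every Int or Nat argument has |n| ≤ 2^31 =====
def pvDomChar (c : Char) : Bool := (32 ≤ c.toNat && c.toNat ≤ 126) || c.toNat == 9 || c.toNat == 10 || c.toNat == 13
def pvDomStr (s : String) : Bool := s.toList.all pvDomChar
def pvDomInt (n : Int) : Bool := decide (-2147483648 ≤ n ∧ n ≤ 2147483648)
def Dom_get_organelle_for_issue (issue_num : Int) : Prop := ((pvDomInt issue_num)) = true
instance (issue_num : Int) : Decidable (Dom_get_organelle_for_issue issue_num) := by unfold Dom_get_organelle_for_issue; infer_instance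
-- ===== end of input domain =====

-- B replaces A's sequential scan over 35 range tuples with a closed-form index (issue_num-1)//29 into a flat name table; objective: simpler.

-- ===== PORT A =====
-- the literal `ranges` list from A
def pvRanges : List (Int × Int × String) := [
  (1, 29, "ORG-IA-SUBJECT_REGISTRY"),
  (30, 58, "ORG-TB-BOUNDARY_CONTEXT"),
  (59, 87, "ORG-DP-RECORD_STORE"),
  (88, 116, "ORG-CP-POLICY_DEFINITION"),
  (117, 145, "ORG-ST-TRUST_ASSERTION"),
  (146, 174, "ORG-ES-SCHEDULER_EXECUTOR"),
  (175, 203, "ORG-WO-WORKFLOW_ORCHESTRATOR"),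
  (204, 232, "ORG-CI-MESSAGE_GATEWAY"),
  (233, 261, "ORG-FV-VALIDATION_ENGINE"),
  (262, 290, "ORG-RA-RESOURCE_ALLOCATOR"),
  (291, 319, "ORG-EM-EVENT_DISPATCHER"),
  (320, 348, "ORG-OD-DISCOVERY_REGISTRY"),
  (349, 377, "ORG-CM-COMPOSITION_MODELER"),
  (378, 406, "ORG-RG-GOVERNANCE_REGISTRY"),
  (407, 435, "ORG-TS-TELEMETRY_COLLECTOR"),
  (436, 464, "ORG-LG-AUDIT_LOGGER"),
  (465, 493, "ORG-IN-INSTRUMENTATION_PROBE"),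
  (494, 522, "ORG-EI-EXTERNAL_ADAPTER"),
  (523, 551, "UNKNOWN_523"),
  (552, 580, "UNKNOWN_552"),
  (581, 609, "UNKNOWN_581"),
  (610, 638, "UNKNOWN_610"),
  (639, 667, "UNKNOWN_639"),
  (668, 696, "UNKNOWN_668"),
  (697, 725, "UNKNOWN_725"),
  (726, 754, "UNKNOWN_726"),
  (755, 783, "UNKNOWN_755"),
  (784, 812, "UNKNOWN_784"),
  (813, 841, "UNKNOWN_813"),
  (842, 870, "UNKNOWN_842"),
  (871, 899, "UNKNOWN_871"),
  (900, 928, "ORGN-AI-COGNITIVE_PORT"),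
  (929, 957, "ORGN-AI-PROMPT_ASSEMBLER"),
  (958, 986, "ORGN-AI-RESULT_VALIDATOR"),
  (987, 1015, "ORGN-AI-AUDIT_EMITTER")
]

-- the `for lo, hi, name in ranges: if lo <= issue_num <= hi: return name` loop, with `return "UNKNOWN"` after it
def pvScan (rs : List (Int × Int × String)) (issue_num : Int) : String :=
  match rs with
  | [] => "UNKNOWN"
  | (lo, hi, name) :: rest =>
      if lo ≤ issue_num ∧ issue_num ≤ hi then name else pvScan rest issue_num

def get_organelle_for_issue (issue_num : Int) : String :=
  pvScan pvRanges issue_num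

-- ===== PORT B =====
-- the flat name table from Source B (its `_NAMES` constant)
def pvNames : List String := [
  "ORG-IA-SUBJECT_REGISTRY",
  "ORG-TB-BOUNDARY_CONTEXT",
  "ORG-DP-RECORD_STORE",
  "ORG-CP-POLICY_DEFINITION",
  "ORG-ST-TRUST_ASSERTION",
  "ORG-ES-SCHEDULER_EXECUTOR",
  "ORG-WO-WORKFLOW_ORCHESTRATOR",
  "ORG-CI-MESSAGE_GATEWAY",
  "ORG-FV-VALIDATION_ENGINE",
  "ORG-RA-RESOURCE_ALLOCATOR",
  "ORG-EM-EVENT_DISPATCHER",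
  "ORG-OD-DISCOVERY_REGISTRY",
  "ORG-CM-COMPOSITION_MODELER",
  "ORG-RG-GOVERNANCE_REGISTRY",
  "ORG-TS-TELEMETRY_COLLECTOR",
  "ORG-LG-AUDIT_LOGGER",
  "ORG-IN-INSTRUMENTATION_PROBE",
  "ORG-EI-EXTERNAL_ADAPTER",
  "UNKNOWN_523",
  "UNKNOWN_552",
  "UNKNOWN_581",
  "UNKNOWN_610",
  "UNKNOWN_639",
  "UNKNOWN_668",
  "UNKNOWN_725",
  "UNKNOWN_726",
  "UNKNOWN_755",
  "UNKNOWN_784",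
  "UNKNOWN_813",
  "UNKNOWN_842",
  "UNKNOWN_871",
  "ORGN-AI-COGNITIVE_PORT",
  "ORGN-AI-PROMPT_ASSEMBLER",
  "ORGN-AI-RESULT_VALIDATOR",
  "ORGN-AI-AUDIT_EMITTER"
]

def get_organelle_for_issue_alt (issue_num : Int) : String :=
  if 1 ≤ issue_num ∧ issue_num ≤ 1015 then
    -- _NAMES[(issue_num - 1) // 29]: the guard keeps the index in range, so pyGet? is always `some`
    (PySem.List.pyGet? pvNames (PySem.Int.floordiv (issue_num - 1) 29)).getD ""
  else "UNKNOWN"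

-- ===== PRECONDITION & SPEC =====
def Spec_get_organelle_for_issue (issue_num : Int) (out : String) : Prop := out = get_organelle_for_issue_alt issue_num
instance (issue_num : Int) (out : String) : Decidable (Spec_get_organelle_for_issue issue_num out) := by unfold Spec_get_organelle_for_issue; infer_instance

-- ===== CLAIM (what is proved, stated in full; the proofs are below) =====
def Claim_equal_get_organelle_for_issue : Prop := ∀ (issue_num : Int), Dom_get_organelle_for_issue issue_num → Spec_get_organelle_for_issue issue_num (get_organelle_for_issue issue_num)

-- ===== LEMMAS AND PROOFS =====

-- pvScan steps: the head range either matches (return its name) or is skipped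
theorem pvScan_hit (lo hi : Int) (name : String) (rest : List (Int × Int × String)) (n : Int)
    (h1 : lo ≤ n) (h2 : n ≤ hi) : pvScan ((lo, hi, name) :: rest) n = name := by
  simp [pvScan, h1, h2]

theorem pvScan_miss (lo hi : Int) (name : String) (rest : List (Int × Int × String)) (n : Int)
    (h : ¬(lo ≤ n ∧ n ≤ hi)) : pvScan ((lo, hi, name) :: rest) n = pvScan rest n := by
  simp [pvScan, h]

theorem pv_main (n : Int) : get_organelle_for_issue n = get_organelle_for_issue_alt n := by
  unfold get_organelle_for_issue get_organelle_for_issue_alt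
  by_cases h : 1 ≤ n ∧ n ≤ 1015
  · rw [if_pos h]
    obtain ⟨q, hq, hq0, hq34, hlo, hhi⟩ :
        ∃ q : Int, PySem.Int.floordiv (n - 1) 29 = q ∧ 0 ≤ q ∧ q ≤ 34 ∧
          29 * q + 1 ≤ n ∧ n ≤ 29 * q + 29 := by
      refine ⟨PySem.Int.floordiv (n - 1) 29, rfl, ?_, ?_, ?_, ?_⟩ <;>
        · rw [PySem.Int.floordiv_eq_ediv_of_pos (by omega : (0:Int) < 29)]; omega
    rw [hq]
    clear hq h
    interval_cases q <;>
      · unfold pvRanges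
        repeat rw [pvScan_miss _ _ _ _ _ (by omega)]
        rw [pvScan_hit _ _ _ _ _ (by omega) (by omega)]
        rfl
  · rw [if_neg h]
    unfold pvRanges
    repeat rw [pvScan_miss _ _ _ _ _ (by omega)]
    rfl

-- ===== VERDICT (by name: the statement is the Claim_ definition above) =====
theorem get_organelle_for_issue_spec : Claim_equal_get_organelle_for_issue := by
  intro n _
  unfold Spec_get_organelle_for_issue
  exact pv_main n
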